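-- pv_equiv track=rewrite | github.com/jacklxc/CORWA | pipeline/util.py | custom_citation_token2T5
-- ===== SOURCE A (Python) =====
-- def custom_citation_token2T5(dominant_label, reference_label):
--     placeholder = "[TOKEN]"
--     dominant_seq = dominant_label.replace("[E_Dominant] [B_Dominant]",
--                                           placeholder)
--     dominant_seq = dominant_seq.replace("[B_Dominant]", placeholder)
--     dominant_seq = dominant_seq.replace("[E_Dominant]", placeholder)
--
--     reference_seq = reference_label.replace("[E_Reference] [B_Reference]",
--                                             placeholder)
--     reference_seq = reference_seq.replace("[B_Reference]", placeholder)
--     reference_seq = reference_seq.replace("[E_Reference]", placeholder)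
--
--     count = 0
--     new_seq = ["Dominant:"]
--     for token in dominant_seq.split():
--         if token == placeholder:
--             new_seq.append("<extra_id_" + str(count) + ">")
--             count += 1
--         else:
--             new_seq.append(token)
--
--     new_seq.append("Reference:")
--     for token in reference_seq.split():
--         if token == placeholder:
--             new_seq.append("<extra_id_" + str(count) + ">")
--             count += 1
--         else:
--             new_seq.append(token)
--     return " ".join(new_seq)
-- ===== SOURCE B (Python) =====
-- def custom_citation_token2T5(dominant_label, reference_label):
--     placeholder = "[TOKEN]"
--
--     def normalize(s, b, e):
--         return s.replace(e + " " + b, placeholder).replace(b, placeholder).replace(e, placeholder)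
--
--     text = ("Dominant: " + normalize(dominant_label, "[B_Dominant]", "[E_Dominant]")
--             + " Reference: " + normalize(reference_label, "[B_Reference]", "[E_Reference]"))
--
--     # single character-level scan: tokenize and substitute placeholders in one pass
--     pieces = []
--     word = []
--     count = 0
--     for ch in text + " ":
--         if ch.isspace():
--             if word:
--                 w = "".join(word)
--                 if w == placeholder:
--                     w = "<extra_id_" + str(count) + ">"
--                     count += 1
--                 pieces.append(w)
--                 word = []
--         else:
--             word.append(ch)
--     return " ".join(pieces)
-- ===== Notes on version B (the rewrite author's own statement) =====
-- stated objective: alternative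
-- what changed: Replaces A's two separate token loops over split() lists with one character-level scan of the concatenated string that tokenizes and substitutes placeholders in a single pass, without building split lists.
import Mathlib
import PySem

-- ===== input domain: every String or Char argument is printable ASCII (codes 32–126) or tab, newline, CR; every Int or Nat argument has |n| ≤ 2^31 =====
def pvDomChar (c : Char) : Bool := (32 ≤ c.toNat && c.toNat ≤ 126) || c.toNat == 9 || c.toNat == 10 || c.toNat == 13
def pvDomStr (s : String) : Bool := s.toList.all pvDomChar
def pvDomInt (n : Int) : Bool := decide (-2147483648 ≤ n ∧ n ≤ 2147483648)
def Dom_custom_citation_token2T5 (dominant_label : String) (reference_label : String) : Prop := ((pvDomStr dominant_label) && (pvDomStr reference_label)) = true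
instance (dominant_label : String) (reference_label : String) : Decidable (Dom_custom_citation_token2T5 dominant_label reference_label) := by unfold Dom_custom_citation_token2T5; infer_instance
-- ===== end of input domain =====

-- B replaces A's two token-list loops (split + per-token loop + join) by a single
-- character-level scan of one concatenated string that tokenizes and substitutes
-- placeholders in one pass (objective: alternative; same asymptotic cost).

-- ===== PORT A =====
-- the body of A's two 'for token in …' loops: append the token, replacing "[TOKEN]" by the next extra_id
def aStep (st : List String × Int) (token : String) : List String × Int :=
  if token = "[TOKEN]" then (st.1 ++ ["<extra_id_" ++ PySem.Int.toStr st.2 ++ ">"], st.2 + 1)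
  else (st.1 ++ [token], st.2)

def custom_citation_token2T5 (dominant_label : String) (reference_label : String) : String :=
  let placeholder := "[TOKEN]"
  let dominant_seq :=
    PySem.Str.replace
      (PySem.Str.replace
        (PySem.Str.replace dominant_label "[E_Dominant] [B_Dominant]" placeholder)
        "[B_Dominant]" placeholder)
      "[E_Dominant]" placeholder
  let reference_seq :=
    PySem.Str.replace
      (PySem.Str.replace
        (PySem.Str.replace reference_label "[E_Reference] [B_Reference]" placeholder)
        "[B_Reference]" placeholder)
      "[E_Reference]" placeholder
  let st1 := (PySem.Str.split₀ dominant_seq).foldl aStep (["Dominant:"], 0)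
  let st2 := (PySem.Str.split₀ reference_seq).foldl aStep (st1.1 ++ ["Reference:"], st1.2)
  PySem.Str.join " " st2.1

-- ===== PORT B =====
-- Source B's normalize helper
def bNormalize (s b e : String) : String :=
  PySem.Str.replace
    (PySem.Str.replace (PySem.Str.replace s (e ++ " " ++ b) "[TOKEN]") b "[TOKEN]")
    e "[TOKEN]"

-- Source B's 'for ch in text + " "' loop: state = (word chars so far, extra_id counter, finished pieces)
def bScan (chars : List Char) (word : List Char) (count : Int) (pieces : List (List Char)) : List (List Char) :=
  match chars with
  | [] => pieces
  | c :: rest =>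
    if PySem.Chars.isspace c then
      if word = [] then bScan rest [] count pieces
      else if word = "[TOKEN]".toList then
        bScan rest [] (count + 1) (pieces ++ [("<extra_id_" ++ PySem.Int.toStr count ++ ">").toList])
      else bScan rest [] count (pieces ++ [word])
    else bScan rest (word ++ [c]) count pieces

def custom_citation_token2T5_alt (dominant_label : String) (reference_label : String) : String :=
  let text :=
    "Dominant: " ++ bNormalize dominant_label "[B_Dominant]" "[E_Dominant]"
      ++ " Reference: " ++ bNormalize reference_label "[B_Reference]" "[E_Reference]"
  let pieces := bScan (text.toList ++ [' ']) [] 0 []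
  String.ofList (PySem.Chars.join " ".toList pieces)

-- ===== PRECONDITION & SPEC =====
def Spec_custom_citation_token2T5 (dominant_label : String) (reference_label : String) (out : String) : Prop := out = custom_citation_token2T5_alt dominant_label reference_label
instance (dominant_label : String) (reference_label : String) (out : String) : Decidable (Spec_custom_citation_token2T5 dominant_label reference_label out) := by unfold Spec_custom_citation_token2T5; infer_instance

-- ===== CLAIM (what is proved, stated in full; the proofs are below) =====
def Claim_equal_custom_citation_token2T5 : Prop := ∀ (dominant_label : String) (reference_label : String), Dom_custom_citation_token2T5 dominant_label reference_label → Spec_custom_citation_token2T5 dominant_label reference_label (custom_citation_token2T5 dominant_label reference_label)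

-- ===== LEMMAS AND PROOFS =====

-- proof-side model of whitespace tokenization (Python s.split()) with an open word accumulator
def tokC : List Char → List Char → List (List Char)
  | [], word => if word = [] then [] else [word]
  | c :: cs, word =>
    if PySem.Chars.isspace c then
      (if word = [] then tokC cs [] else word :: tokC cs [])
    else tokC cs (word ++ [c])

-- proof-side chars-level version of aStep
def stepC (st : List (List Char) × Int) (t : List Char) : List (List Char) × Int :=
  if t = "[TOKEN]".toList then
    (st.1 ++ [("<extra_id_" ++ PySem.Int.toStr st.2 ++ ">").toList], st.2 + 1)
  else (st.1 ++ [t], st.2)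

theorem go_eq_tokC : ∀ (cs cur : List Char) (acc : List (List Char)),
    PySem.Chars.split₀.go cs cur acc = acc.reverse ++ tokC cs cur.reverse := by
  intro cs
  induction cs with
  | nil =>
    intro cur acc
    by_cases h : cur = []
    · simp [PySem.Chars.split₀.go, tokC, h]
    · simp [PySem.Chars.split₀.go, tokC, h, List.isEmpty_iff, List.reverse_eq_nil_iff]
  | cons c cs ih =>
    intro cur acc
    by_cases hsp : PySem.Chars.isspace c = true
    · by_cases h : cur = []
      · simp [PySem.Chars.split₀.go, tokC, hsp, h, ih]
      · simp [PySem.Chars.split₀.go, tokC, hsp, h, List.isEmpty_iff, ih,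
          List.reverse_eq_nil_iff]
    · simp [PySem.Chars.split₀.go, tokC, hsp, ih, List.reverse_cons]

theorem split₀_eq_tokC (cs : List Char) : PySem.Chars.split₀ cs = tokC cs [] := by
  simpa using go_eq_tokC cs [] []

theorem tokC_append_space : ∀ (xs ys word : List Char),
    tokC (xs ++ ' ' :: ys) word = tokC xs word ++ tokC ys [] := by
  have hs : PySem.Chars.isspace ' ' = true := by decide
  intro xs
  induction xs with
  | nil =>
    intro ys word
    by_cases h : word = [] <;> simp [tokC, h, hs]
  | cons c xs ih =>
    intro ys word
    by_cases hsp : PySem.Chars.isspace c = true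
    · by_cases h : word = [] <;> simp [tokC, hsp, h, ih]
    · simp [tokC, hsp, ih]

-- the character scan computes the fold of stepC over the tokens (the trailing space flushes the word)
theorem bScan_eq_foldl : ∀ (cs word : List Char) (count : Int) (pieces : List (List Char)),
    bScan (cs ++ [' ']) word count pieces = ((tokC cs word).foldl stepC (pieces, count)).1 := by
  have hs : PySem.Chars.isspace ' ' = true := by decide
  intro cs
  induction cs with
  | nil =>
    intro word count pieces
    by_cases h : word = []
    · simp [bScan, tokC, h, hs]
    · by_cases hp : word = ['[', 'T', 'O', 'K', 'E', 'N', ']'] <;>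
        simp [bScan, tokC, stepC, h, hp, hs]
  | cons c cs ih =>
    intro word count pieces
    by_cases hsp : PySem.Chars.isspace c = true
    · by_cases h : word = []
      · simp [bScan, tokC, hsp, h, ih]
      · by_cases hp : word = ['[', 'T', 'O', 'K', 'E', 'N', ']'] <;>
          simp [bScan, tokC, stepC, hsp, h, hp, ih]
    · simp [bScan, tokC, hsp, ih]

-- A's String-level fold corresponds to the chars-level fold
theorem aStep_foldl_toList : ∀ (toks : List String) (seq : List String) (cnt : Int),
    ((toks.map String.toList).foldl stepC (seq.map String.toList, cnt))
      = ((toks.foldl aStep (seq, cnt)).1.map String.toList, (toks.foldl aStep (seq, cnt)).2) := by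
  intro toks
  induction toks with
  | nil => intro seq cnt; simp
  | cons t toks ih =>
    intro seq cnt
    by_cases h : t = "[TOKEN]"
    · have h' : t.toList = "[TOKEN]".toList := by rw [h]
      have : ((seq ++ ["<extra_id_" ++ PySem.Int.toStr cnt ++ ">"]).map String.toList)
          = seq.map String.toList ++ [("<extra_id_" ++ PySem.Int.toStr cnt ++ ">").toList] := by
        simp
      simp only [List.map_cons, List.foldl_cons, stepC, aStep, h, if_pos]
      rw [← this, ih]
    · have h' : ¬ t.toList = "[TOKEN]".toList := fun hc => h (String.ext_iff.mpr hc)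
      have : ((seq ++ [t]).map String.toList) = seq.map String.toList ++ [t.toList] := by simp
      simp only [List.map_cons, List.foldl_cons, stepC, aStep, h, h', if_neg, if_false,
        ite_false]
      rw [← this, ih]

theorem tokC_DH : tokC "Dominant:".toList [] = ["Dominant:".toList] := by decide
theorem tokC_RH : tokC "Reference:".toList [] = ["Reference:".toList] := by decide


theorem main_eq (D R : String) :
    PySem.Str.join " "
      (((PySem.Str.split₀ R).foldl aStep
          (((PySem.Str.split₀ D).foldl aStep (["Dominant:"], 0)).1 ++ ["Reference:"],
            ((PySem.Str.split₀ D).foldl aStep (["Dominant:"], 0)).2)).1)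
      = String.ofList (PySem.Chars.join " ".toList
          (bScan (("Dominant: " ++ D ++ " Reference: " ++ R).toList ++ [' ']) [] 0 [])) := by
  have hA : "Dominant: ".toList = "Dominant:".toList ++ [' '] := by decide
  have hB : " Reference: ".toList = [' '] ++ "Reference:".toList ++ [' '] := by decide
  have htext : ("Dominant: " ++ D ++ " Reference: " ++ R).toList
      = "Dominant:".toList ++ ' ' :: (D.toList ++ ' ' :: ("Reference:".toList ++ ' ' :: R.toList)) := by
    have h1 : ("Dominant: " ++ D ++ " Reference: " ++ R).toList
        = "Dominant: ".toList ++ D.toList ++ " Reference: ".toList ++ R.toList := by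
      simp [String.toList_append]
    rw [h1, hA, hB]
    simp
  rw [bScan_eq_foldl, htext, tokC_append_space, tokC_append_space, tokC_append_space,
    tokC_DH, tokC_RH, ← split₀_eq_tokC, ← split₀_eq_tokC,
    ← PySem.Str.split₀_map_toList, ← PySem.Str.split₀_map_toList]
  simp only [List.foldl_append, List.foldl_cons, List.foldl_nil]
  have e1 : stepC ([], 0) "Dominant:".toList = (["Dominant:"].map String.toList, 0) := by
    simp [stepC]
  rw [e1, aStep_foldl_toList]
  have e3 : stepC ((((PySem.Str.split₀ D).foldl aStep (["Dominant:"], 0)).1).map String.toList,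
        ((PySem.Str.split₀ D).foldl aStep (["Dominant:"], 0)).2) "Reference:".toList
      = ((((PySem.Str.split₀ D).foldl aStep (["Dominant:"], 0)).1 ++ ["Reference:"]).map String.toList,
        ((PySem.Str.split₀ D).foldl aStep (["Dominant:"], 0)).2) := by
    simp [stepC]
  rw [e3, aStep_foldl_toList]
  simp [PySem.Str.join]

-- ===== VERDICT (by name: the statement is the Claim_ definition above) =====
theorem custom_citation_token2T5_spec : Claim_equal_custom_citation_token2T5 := by
  intro D R _hdom
  unfold Spec_custom_citation_token2T5 custom_citation_token2T5 custom_citation_token2T5_alt bNormalize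
  have hpd : ("[E_Dominant]" ++ " " ++ "[B_Dominant]" : String) = "[E_Dominant] [B_Dominant]" := by decide
  have hpr : ("[E_Reference]" ++ " " ++ "[B_Reference]" : String) = "[E_Reference] [B_Reference]" := by decide
  rw [hpd, hpr]
  exact main_eq _ _
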